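-- pv_equiv track=rewrite | github.com/tarsam2009/mathematics | research/lattice.py | solve_hikita
-- ===== SOURCE A (Python) =====
-- def solve_hikita( point ):
-- 	#Give the correct word for this point
-- 	word = []
-- 	n = len(point) + 1
-- 	i=0
-- 	while any( not x==0 for x in point ):
-- 		weight = sum(point)
-- 		l = -1
--
-- 		if not point[-1] == 0:
-- 			l = n-1
-- 		else:
-- 			#Find the first where x isn't zero
-- 			index = next( pair[0] for pair in reversed(list(enumerate( point ))) if not pair[1] == 0 )
-- 			l = index+1
--
-- 		#Note, indices are +1 in Hikitas' paper
-- 		action = (weight+l)%n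
-- 		point = hikita_action( point, (weight+l)%n )
-- 		word.append(action)
-- 	return word
--
-- def hikita_action( point, action ):
-- 	point = list(point)
-- 	n = len(point)+1
--
-- 	if action >= n:
-- 		raise ArithmeticError( 'Action not bounded by n' )
--
-- 	a = sum( point )
-- 	l = (action - a) % n
-- 	#print 'l', l
--
-- 	if l == 0:
-- 		i = point.pop(0)
-- 		point.append(i+1)
-- 	elif l < n-1:
-- 		point[l-1], point[l] = point[l], point[l-1]
-- 	else: #l == n-1
-- 		if point[-1] == 0:
-- 			pass #Do nothing
-- 		else:
-- 			i = point.pop(-1)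
-- 			point.insert(0, i-1)
--
-- 	return tuple(point)
-- ===== SOURCE B (Python) =====
-- def solve_hikita(point):
--     # Per-round simulation: the last nonzero entry v at index j always shifts
--     # right to the end and then wraps to the front as v-1; one round emits the
--     # n-1-j consecutive residues (S+j+1)%n .. (S+n-1)%n, where S is the current
--     # sum (invariant under the shifts).  O(n) per round instead of O(n) per
--     # emitted letter.
--     n = len(point) + 1
--     pt = list(point)
--     S = sum(pt)
--     word = []
--     while True:
--         j = -1
--         for k in range(len(pt)):
--             if pt[k] != 0:
--                 j = k
--         if j < 0:
--             break
--         v = pt[j]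
--         base = S + j + 1
--         word.extend((base + t) % n for t in range(n - 1 - j))
--         pt = [v - 1] + pt[:j] + [0] * (n - 2 - j)
--         S -= 1
--     return word
-- ===== Notes on version B (the rewrite author's own statement) =====
-- stated objective: faster
-- what changed: B replaces A's per-step simulation (each while-iteration recomputes sum(point), rescans for the last nonzero index and rebuilds the list to move it one slot) by a per-round simulation: the last nonzero entry v at index j always shifts straight to the end and wraps to the front as v-1, so B maintains the running sum, emits the whole block of n-1-j consecutive residues at once, and rebuilds the list once per round.
import Mathlib
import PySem

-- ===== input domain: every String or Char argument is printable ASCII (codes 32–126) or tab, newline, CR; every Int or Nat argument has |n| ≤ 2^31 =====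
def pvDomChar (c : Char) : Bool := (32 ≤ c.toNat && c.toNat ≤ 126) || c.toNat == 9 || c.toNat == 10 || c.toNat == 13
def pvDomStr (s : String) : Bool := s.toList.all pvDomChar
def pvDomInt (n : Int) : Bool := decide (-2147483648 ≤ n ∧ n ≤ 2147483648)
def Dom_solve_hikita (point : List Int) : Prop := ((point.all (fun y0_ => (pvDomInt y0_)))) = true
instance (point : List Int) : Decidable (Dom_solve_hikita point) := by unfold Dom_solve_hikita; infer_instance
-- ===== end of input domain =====

-- B replaces A's per-step simulation by a per-round simulation (the whole shift-to-the-end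
-- block of one round is emitted at once); same return value wherever A terminates.

-- ===== PORT A =====
-- Python hikita_action(point, action), transliterated
def hikita_action (point : List Int) (action : Int) : List Int :=
  let n : Int := (point.length : Int) + 1
  if action ≥ n then point  -- 'raise ArithmeticError': unreachable from solve_hikita (its action is _ % n, n > 0)
  else
    let a := point.sum
    let l := PySem.Int.mod (action - a) n
    if l = 0 then
      match point with
      | [] => []              -- point.pop(0) on [] raises: unreachable from solve_hikita (while-guard)
      | i :: rest => rest ++ [i + 1]
    else if l < n - 1 then
      -- point[l-1], point[l] = point[l], point[l-1]  (both indices in range: 1 ≤ l ≤ n-2)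
      (point.set (l - 1).toNat (point.getD l.toNat 0)).set l.toNat (point.getD (l - 1).toNat 0)
    else
      if point.getLastD 0 = 0 then point
      else (point.getLastD 0 - 1) :: point.dropLast   -- i = point.pop(-1); point.insert(0, i-1)

-- next(pair[0] for pair in reversed(list(enumerate(point))) if not pair[1] == 0)
def lastNZ (point : List Int) : Int :=
  match (PySem.List.enumerate point).reverse.find? (fun p => !(p.2 == 0)) with
  | some p => p.1
  | none => 0  -- StopIteration: unreachable (the while-guard guarantees a nonzero entry)

-- the while-loop of solve_hikita; the fuel is only a totality device (A diverges on negative entries)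
def solveALoop : Nat → List Int → List Int → List Int
  | 0, _, word => word
  | fuel+1, point, word =>
    if point.any (fun x => !(x == 0)) then
      let weight := point.sum
      let n : Int := (point.length : Int) + 1
      let l : Int := if !(point.getLastD 0 == 0) then n - 1 else lastNZ point + 1
      let action := PySem.Int.mod (weight + l) n
      solveALoop fuel (hikita_action point action) (word ++ [action])
    else word

def solve_hikita (point : List Int) : List Int :=
  -- fuel bound: at most sum*length iterations happen when all entries are ≥ 0
  solveALoop (point.sum.toNat * point.length + 1) point []

-- ===== PORT B =====
-- the while-loop of Source B; the fuel is only a totality device (one round per iteration)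
def solveBLoop : Nat → List Int → Int → List Int → List Int
  | 0, _, _, word => word
  | fuel+1, pt, S, word =>
    let j : Int := (List.range pt.length).foldl (fun acc k => if pt.getD k 0 ≠ 0 then (k : Int) else acc) (-1)
    if j < 0 then word
    else
      let n : Int := (pt.length : Int) + 1
      let v := pt.getD j.toNat 0
      let base := S + j + 1
      let emitted := (List.range (n - 1 - j).toNat).map (fun (t : Nat) => PySem.Int.mod (base + (t : Int)) n)
      solveBLoop fuel ((v - 1) :: (pt.take j.toNat ++ List.replicate (n - 2 - j).toNat 0)) (S - 1) (word ++ emitted)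

def solve_hikita_alt (point : List Int) : List Int :=
  solveBLoop (point.sum.toNat + 1) point point.sum []

-- ===== PRECONDITION & SPEC =====
-- Pre_ excludes exactly the inputs with a negative entry: there A's while-loop never
-- terminates (a negative value is wrapped to the front ever more negative), so A
-- returns no value; on all other inputs A returns normally.
def Pre_solve_hikita (point : List Int) : Prop := ∀ x ∈ point, 0 ≤ x
instance (point : List Int) : Decidable (Pre_solve_hikita point) := by unfold Pre_solve_hikita; infer_instance
def pvWitness_solve_hikita : List Int := [1, 0, 2]

def Spec_solve_hikita (point : List Int) (out : List Int) : Prop := out = solve_hikita_alt point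
instance (point : List Int) (out : List Int) : Decidable (Spec_solve_hikita point out) := by unfold Spec_solve_hikita; infer_instance

-- ===== CLAIM (what is proved, stated in full; the proofs are below) =====
def Claim_equal_solve_hikita : Prop := ∀ (point : List Int), Dom_solve_hikita point → Pre_solve_hikita point → Spec_solve_hikita point (solve_hikita point)

-- ===== LEMMAS AND PROOFS =====

-- (a + b) % n shifted back by a is b again, for 0 ≤ b < n
theorem pv_mod_shift (a b n : Int) (hn : 0 < n) (hb0 : 0 ≤ b) (hbn : b < n) :
    PySem.Int.mod (PySem.Int.mod (a + b) n - a) n = b := by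
  rw [PySem.Int.mod_eq_emod_of_pos hn, PySem.Int.mod_eq_emod_of_pos hn]
  rw [Int.emod_def (a+b) n]
  have : a + b - n * ((a + b) / n) - a = b + n * (-((a + b) / n)) := by ring
  rw [this, Int.add_mul_emod_self_left, Int.emod_eq_of_lt hb0 hbn]

-- a fold that never changes the accumulator
theorem pv_foldl_id {α β : Type} (l : List α) (g : β → α → β) (init : β)
    (h : ∀ x ∈ l, ∀ acc, g acc x = acc) : l.foldl g init = init := by
  induction l generalizing init with
  | nil => rfl
  | cons a t ih => simp only [List.foldl_cons, h a (by simp)]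
                   exact ih init (fun x hx acc => h x (List.mem_cons_of_mem a hx) acc)

-- any list with a nonzero entry splits as u ++ v :: 0^r with v ≠ 0
theorem pv_decomp (pt : List Int) (h : ∃ x ∈ pt, x ≠ 0) :
    ∃ u v r, v ≠ 0 ∧ pt = u ++ v :: List.replicate r 0 := by
  induction pt with
  | nil => obtain ⟨x, hx, _⟩ := h; cases hx
  | cons a t ih =>
    by_cases ht : ∃ x ∈ t, x ≠ 0
    · obtain ⟨u, v, r, hv, he⟩ := ih ht
      exact ⟨a :: u, v, r, hv, by rw [he]; rfl⟩
    · push_neg at ht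
      have ha : a ≠ 0 := by
        obtain ⟨x, hx, hxne⟩ := h
        rcases List.mem_cons.mp hx with h1 | h2
        · exact h1 ▸ hxne
        · exact absurd (ht x h2) hxne
      exact ⟨[], a, t.length, ha, by simpa using List.eq_replicate_of_mem ht⟩

theorem pv_lastNZ (u : List Int) (v : Int) (r : Nat) (hv : v ≠ 0) :
    lastNZ (u ++ v :: List.replicate r 0) = (u.length : Int) := by
  unfold lastNZ
  rw [PySem.List.enumerate_append, PySem.List.enumerate_cons, List.reverse_append,
      List.reverse_cons, List.find?_append, List.find?_append]
  have h1 : (PySem.List.enumerate (List.replicate r (0:Int)) ((0:Int) + u.length + 1)).reverse.find?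
      (fun p => !(p.2 == 0)) = none := by
    apply List.find?_eq_none.mpr
    intro p hp
    rw [List.mem_reverse] at hp
    obtain ⟨k, hk, rfl⟩ := (PySem.List.mem_enumerate_iff _ _ _).mp hp
    simp
  rw [h1]
  simp [hv]

theorem pv_swap_shape (u : List Int) (v b : Int) (rest : List Int) :
    ((u ++ v :: b :: rest).set u.length ((u ++ v :: b :: rest).getD (u.length + 1) 0)).set
      (u.length + 1) ((u ++ v :: b :: rest).getD u.length 0) = u ++ b :: v :: rest := by
  induction u with
  | nil => simp
  | cons a t ih => simp [ih]

theorem pv_action_wrap (u : List Int) (v : Int) (hv : v ≠ 0) :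
    hikita_action (u ++ [v])
      (PySem.Int.mod ((u ++ [v]).sum + (((u ++ [v]).length : Int) + 1 - 1)) (((u ++ [v]).length : Int) + 1))
      = (v - 1) :: u := by
  have hlen : ((u ++ [v]).length : Int) = (u.length : Int) + 1 := by simp
  have hnpos : (0:Int) < ((u ++ [v]).length : Int) + 1 := by positivity
  have hmod := pv_mod_shift ((u ++ [v]).sum) (((u ++ [v]).length : Int) + 1 - 1)
      (((u ++ [v]).length : Int) + 1) hnpos (by omega) (by omega)
  simp only [hikita_action, hmod]
  rw [if_neg (not_le.mpr (PySem.Int.mod_lt _ hnpos))]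
  rw [if_neg (by omega), if_neg (by omega)]
  rw [List.getLastD_concat, List.dropLast_concat]
  rw [if_neg hv]

theorem pv_action_swap (u : List Int) (v : Int) (w : List Int) :
    hikita_action (u ++ v :: 0 :: w)
      (PySem.Int.mod ((u ++ v :: 0 :: w).sum + ((u.length : Int) + 1)) (((u ++ v :: 0 :: w).length : Int) + 1))
      = u ++ 0 :: v :: w := by
  have hlen : ((u ++ v :: 0 :: w).length : Int) = (u.length : Int) + 2 + w.length := by simp; omega
  have hnpos : (0:Int) < ((u ++ v :: 0 :: w).length : Int) + 1 := by positivity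
  have hmod := pv_mod_shift ((u ++ v :: 0 :: w).sum) ((u.length : Int) + 1)
      (((u ++ v :: 0 :: w).length : Int) + 1) hnpos (by omega) (by omega)
  have h1 : ((u.length : Int) + 1 - 1).toNat = u.length := by omega
  have h2 : ((u.length : Int) + 1).toNat = u.length + 1 := by omega
  simp only [hikita_action, hmod]
  rw [if_neg (not_le.mpr (PySem.Int.mod_lt _ hnpos))]
  rw [if_neg (by omega), if_pos (by omega)]
  rw [h1, h2, pv_swap_shape]

-- one full round of A: shift the last nonzero v to the end, wrap it to the front as v-1
theorem pv_roundA (v S n : Int) (hv : v ≠ 0) (r : Nat) : ∀ (u : List Int) (fuel : Nat) (word : List Int),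
    S = u.sum + v → n = (u.length : Int) + r + 2 →
    solveALoop (fuel + r + 1) (u ++ v :: List.replicate r 0) word
    = solveALoop fuel ((v - 1) :: (u ++ List.replicate r 0))
        (word ++ (List.range (r+1)).map fun (t : Nat) => PySem.Int.mod (S + (u.length : Int) + 1 + (t : Int)) n) := by
  induction r with
  | zero =>
    intro u fuel word hS hn
    have hany : (u ++ [v]).any (fun x => !(x == 0)) = true := by simp [hv]
    simp only [List.replicate_zero, Nat.add_zero, List.append_nil]
    rw [solveALoop, hany]
    simp only [if_true, List.getLastD_concat]
    rw [if_pos (by simp [hv])]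
    have hw := pv_action_wrap u v hv
    have hn' : ((u ++ [v]).length : Int) + 1 = n := by simp [hn]; ring
    rw [hn'] at hw
    rw [hn', hw]
    have harg : (u ++ [v]).sum + (n - 1) = S + (u.length : Int) + 1 + ((0:Nat) : Int) := by
      simp [hS, hn]; ring
    rw [harg]
    simp [List.range_succ]
  | succ r ih =>
    intro u fuel word hS hn
    have hcons : (0 : Int) :: List.replicate r (0:Int) = List.replicate r (0:Int) ++ [0] := by
      rw [← List.replicate_succ, List.replicate_succ']
    have hsplit : u ++ v :: List.replicate (r+1) 0 = u ++ v :: 0 :: List.replicate r (0:Int) := by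
      simp [List.replicate_succ]
    have hlastD : (u ++ v :: 0 :: List.replicate r (0:Int)).getLastD 0 = 0 := by
      rw [show u ++ v :: 0 :: List.replicate r (0:Int) = (u ++ v :: List.replicate r 0) ++ [0] by
            rw [hcons]; simp]
      rw [List.getLastD_concat]
    have hany : (u ++ v :: 0 :: List.replicate r (0:Int)).any (fun x => !(x == 0)) = true := by
      simp [hv]
    rw [hsplit]
    rw [show fuel + (r+1) + 1 = (fuel + r + 1) + 1 from rfl]
    rw [solveALoop, hany]
    simp only [if_true, hlastD]
    rw [if_neg (by simp)]
    have hlnz : lastNZ (u ++ v :: 0 :: List.replicate r (0:Int)) + 1 = (u.length : Int) + 1 := by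
      rw [show u ++ v :: 0 :: List.replicate r (0:Int) = u ++ v :: List.replicate (r+1) 0 from hsplit.symm,
          pv_lastNZ u v (r+1) hv]
    rw [hlnz]
    rw [pv_action_swap u v (List.replicate r 0)]
    have hre : u ++ 0 :: v :: List.replicate r (0:Int) = (u ++ [0]) ++ v :: List.replicate r 0 := by
      simp
    rw [hre]
    rw [ih (u ++ [0]) fuel _ (by simp [hS]) (by simp [hn]; push_cast; ring)]
    have hstate : (v - 1) :: (u ++ [0] ++ List.replicate r (0:Int)) = (v - 1) :: (u ++ List.replicate (r+1) 0) := by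
      simp [List.replicate_succ]
    rw [hstate, List.append_assoc]
    congr 2
    conv_rhs => rw [List.range_succ_eq_map, List.map_cons, List.map_map]
    simp only [List.singleton_append]
    congr 1
    · congr 1
      · simp [hS]; push_cast; ring
      · simp [hn]; push_cast; ring
    · apply List.map_congr_left
      intro t _
      simp only [Function.comp_apply]
      congr 1
      push_cast [List.length_append, List.length_singleton]
      ring

theorem pv_getD_append (u l : List Int) (m : Nat) : (u ++ l).getD (u.length + m) 0 = l.getD m 0 := by
  induction u with
  | nil => simp
  | cons a t ih =>
    rw [show (a :: t).length + m = (t.length + m) + 1 by rw [List.length_cons]; omega]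
    simpa using ih

theorem pv_getD_replicate (r m : Nat) : (List.replicate r (0:Int)).getD m 0 = 0 := by
  induction r generalizing m with
  | zero => simp
  | succ r ih =>
    cases m with
    | zero => simp [List.replicate_succ]
    | succ m => simpa [List.replicate_succ] using ih m

-- B's forward scan for the last nonzero index
theorem pv_scanB (u : List Int) (v : Int) (r : Nat) (hv : v ≠ 0) :
    (List.range (u ++ v :: List.replicate r 0).length).foldl
      (fun acc k => if (u ++ v :: List.replicate r 0).getD k 0 ≠ 0 then (k : Int) else acc) (-1)
      = (u.length : Int) := by
  have hplen : (u ++ v :: List.replicate r 0).length = u.length + (r + 1) := by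
    rw [List.length_append, List.length_cons, List.length_replicate]
  rw [hplen, List.range_add, List.foldl_append, List.foldl_map, List.range_succ_eq_map, List.foldl_cons]
  have hv0 : (u ++ v :: List.replicate r 0).getD (u.length + 0) 0 = v := by
    simpa using pv_getD_append u (v :: List.replicate r 0) 0
  rw [if_pos (by rw [hv0]; exact hv)]
  apply pv_foldl_id
  intro x hx acc
  obtain ⟨t, _, rfl⟩ := List.mem_map.mp hx
  have : (u ++ v :: List.replicate r 0).getD (u.length + t.succ) 0 = 0 := by
    rw [pv_getD_append u (v :: List.replicate r 0) t.succ]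
    simpa using pv_getD_replicate r t
  rw [if_neg (by simp only [ne_eq, not_not]; simpa using this)]

-- one round of B on the same configuration
theorem pv_roundB (v S n : Int) (hv : v ≠ 0) (r : Nat) (u : List Int) (fuel : Nat) (word : List Int)
    (hn : n = (u.length : Int) + r + 2) :
    solveBLoop (fuel + 1) (u ++ v :: List.replicate r 0) S word
    = solveBLoop fuel ((v - 1) :: (u ++ List.replicate r 0)) (S - 1)
        (word ++ (List.range (r+1)).map fun (t : Nat) => PySem.Int.mod (S + (u.length : Int) + 1 + (t : Int)) n) := by
  have hj := pv_scanB u v r hv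
  have hlen : ((u ++ v :: List.replicate r 0).length : Int) = (u.length : Int) + (r : Int) + 1 := by
    rw [List.length_append, List.length_cons, List.length_replicate]
    push_cast
    ring
  simp only [solveBLoop, hj]
  rw [if_neg (not_lt.mpr (Int.natCast_nonneg _))]
  rw [Int.toNat_natCast]
  rw [show (u ++ v :: List.replicate r 0).getD u.length 0 = v by
        simpa using pv_getD_append u (v :: List.replicate r 0) 0]
  rw [List.take_left]
  rw [hlen]
  rw [show ((u.length : Int) + (r : Int) + 1 + 1 - 2 - (u.length : Int)).toNat = r by omega]
  rw [show ((u.length : Int) + (r : Int) + 1 + 1 - 1 - (u.length : Int)).toNat = r + 1 by omega]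
  congr 1
  congr 1
  apply List.map_congr_left
  intro t _
  congr 1
  rw [hn]
  push_cast
  ring

-- the two loops agree, given enough fuel, on nonnegative states
theorem pv_main (s : Nat) : ∀ (pt word : List Int) (fa fb : Nat),
    pt.sum = (s : Int) → (∀ x ∈ pt, 0 ≤ x) → s * pt.length + 1 ≤ fa → s + 1 ≤ fb →
    solveALoop fa pt word = solveBLoop fb pt pt.sum word := by
  induction s with
  | zero =>
    intro pt word fa fb hsum hpos hfa hfb
    have hz : ∀ x ∈ pt, x = 0 := by
      intro x hx
      have h1 := List.single_le_sum hpos x hx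
      have h2 := hpos x hx
      omega
    have hget : ∀ k : Nat, pt[k]?.getD 0 = 0 := by
      intro k
      cases hk : pt[k]? with
      | none => rfl
      | some x => simpa using hz x (List.mem_of_getElem? hk)
    obtain ⟨fa', rfl⟩ : ∃ m, fa = m + 1 := ⟨fa - 1, by omega⟩
    obtain ⟨fb', rfl⟩ : ∃ m, fb = m + 1 := ⟨fb - 1, by omega⟩
    rw [solveALoop, solveBLoop]
    rw [if_neg (by simp; exact hz)]
    rw [pv_foldl_id _ _ _ (fun k _ acc => by simp [List.getD_eq_getElem?_getD, hget k])]
    rw [if_pos (by norm_num)]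
  | succ s ih =>
    intro pt word fa fb hsum hpos hfa hfb
    have hex : ∃ x ∈ pt, x ≠ 0 := by
      by_contra h
      push_neg at h
      have h0 : pt.sum = 0 := List.sum_eq_zero h
      rw [h0] at hsum
      omega
    obtain ⟨u, v, r, hv, rfl⟩ := pv_decomp pt hex
    have hsum' : (u ++ v :: List.replicate r 0).sum = u.sum + v := by
      simp
    have hL : (u ++ v :: List.replicate r 0).length = u.length + r + 1 := by
      rw [List.length_append, List.length_cons, List.length_replicate]
      omega
    rw [hL] at hfa
    have hring : (s+1) * (u.length + r + 1) = s * (u.length + r + 1) + (u.length + r + 1) := by ring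
    obtain ⟨fuelA, rfl, hfa'⟩ : ∃ m, fa = m + r + 1 ∧ s * (u.length + r + 1) + 1 ≤ m :=
      ⟨fa - (r + 1), by omega, by omega⟩
    obtain ⟨fuelB, rfl, hfb'⟩ : ∃ m, fb = m + 1 ∧ s + 1 ≤ m := ⟨fb - 1, by omega, by omega⟩
    rw [pv_roundA v (u.sum + v) ((u.length : Int) + r + 2) hv r u fuelA word rfl rfl]
    rw [hsum']
    rw [pv_roundB v (u.sum + v) ((u.length : Int) + r + 2) hv r u fuelB word rfl]
    have hsum2 : ((v - 1) :: (u ++ List.replicate r 0)).sum = (s : Int) := by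
      have : (u ++ v :: List.replicate r 0).sum = u.sum + v := hsum'
      rw [this] at hsum
      simp
      push_cast at hsum ⊢
      omega
    have hpos2 : ∀ x ∈ (v - 1) :: (u ++ List.replicate r 0), 0 ≤ x := by
      intro x hx
      rcases List.mem_cons.mp hx with rfl | hx'
      · have : 0 ≤ v := hpos v (by simp)
        omega
      · rcases List.mem_append.mp hx' with hu | hr
        · exact hpos x (by simp [hu])
        · rw [List.eq_of_mem_replicate hr]
    have hlen2 : ((v - 1) :: (u ++ List.replicate r 0)).length = u.length + r + 1 := by simp
    rw [show u.sum + v - 1 = ((v - 1) :: (u ++ List.replicate r 0)).sum by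
          rw [List.sum_cons, List.sum_append, List.sum_replicate]
          simp
          ring]
    exact ih _ _ fuelA fuelB hsum2 hpos2 (by rw [hlen2]; omega) (by omega)

-- ===== VERDICT (by name: the statement is the Claim_ definition above) =====
theorem solve_hikita_spec : Claim_equal_solve_hikita := by
  intro pt _ hpre
  unfold Spec_solve_hikita solve_hikita solve_hikita_alt
  have hs : pt.sum = ((pt.sum.toNat : Nat) : Int) :=
    (Int.toNat_of_nonneg (List.sum_nonneg hpre)).symm
  exact pv_main pt.sum.toNat pt [] _ _ hs hpre le_rfl le_rfl
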